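-- pv_equiv track=rewrite | github.com/letmeloveyou82/Algorithm | Python/Programmers/스택 & 큐/택배 상자 꺼내기.py | solution
-- ===== SOURCE A (Python) =====
-- def solution(n, w, num):
--     answer = 0
--     stack = [[] for _ in range(w)]
--     right = True
--     idx = 0
--     check_idx = 0
--     for i in range(1, n+1):
--         stack[idx].append(i)
--         if i == num:
--             check_idx = idx
--         if right :
--             if idx == w-1:
--                 right = False
--                 continue
--             idx += 1
--         else:
--             if idx == 0:
--                 right = True
--                 continue
--             idx -= 1
--
--     while num != stack[check_idx].pop():
--         answer += 1
--     return answer+1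
-- ===== SOURCE B (Python) =====
-- def solution(n, w, num):
--     # O(1): boxes revisit each column with period 2*w (endpoint columns hold
--     # two consecutive boxes); count boxes k in [num, n] sharing num's column.
--     if w <= 0 or num < 1 or n < num:
--         raise IndexError("box num is not in the pile")
--     p = 2 * w
--     r = (num - 1) % p
--     c = r if r < w else p - 1 - r
--
--     def cnt(res):
--         # number of t in [num-1, n-1] with t % p == res
--         return (n - 1 - res) // p - (num - 2 - res) // p
--
--     return cnt(c) + cnt(p - 1 - c)
-- ===== Notes on version B (the rewrite author's own statement) =====
-- stated objective: faster
-- what changed: Replaced the simulation that builds all w columns, pushes all n boxes in zigzag order and pops until num, by an O(1) arithmetic count: num's column repeats with period 2*w, so the boxes above num are counted with two floor-division residue counts.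
import Mathlib
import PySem

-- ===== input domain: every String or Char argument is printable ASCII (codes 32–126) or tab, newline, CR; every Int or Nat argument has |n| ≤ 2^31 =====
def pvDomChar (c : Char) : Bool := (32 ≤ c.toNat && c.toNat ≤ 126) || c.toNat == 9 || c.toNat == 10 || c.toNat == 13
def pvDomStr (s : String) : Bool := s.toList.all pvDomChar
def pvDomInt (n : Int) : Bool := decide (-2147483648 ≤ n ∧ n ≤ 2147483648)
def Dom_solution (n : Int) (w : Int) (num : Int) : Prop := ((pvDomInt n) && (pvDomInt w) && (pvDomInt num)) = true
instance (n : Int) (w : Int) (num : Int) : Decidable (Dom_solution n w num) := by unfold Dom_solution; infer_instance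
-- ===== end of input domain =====

-- B replaces A's O(n + w) zigzag simulation by an O(1) arithmetic residue count
-- (num's column repeats with period 2*w); proved equal on 1 ≤ w ∧ 1 ≤ num ≤ n.

-- ===== PORT A =====

-- the while-pop loop: pop from the end of the column until num is popped
-- (here the column is passed already reversed, so we pop from the head).
-- On [] Python would raise IndexError from .pop(); excluded by Pre_solution.
def popWhileRev (num : Int) : List Int → Int → Int
  | [], answer => answer + 1
  | x :: rest, answer => if num = x then answer + 1 else popWhileRev num rest (answer + 1)

-- one iteration of A's for-loop body; idx/check are in [0, w) under Pre_,
-- so indexing with .toNat/set/getD is exact there.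
def stepA (w : Int) (num : Int) (s : List (List Int) × Bool × Int × Int) (i : Int) :
    List (List Int) × Bool × Int × Int :=
  let stack := s.1
  let right := s.2.1
  let idx := s.2.2.1
  let check := s.2.2.2
  let stack := stack.set idx.toNat ((stack.getD idx.toNat []) ++ [i])
  let check := if i = num then idx else check
  if right then
    if idx = w - 1 then (stack, false, idx, check)
    else (stack, true, idx + 1, check)
  else
    if idx = 0 then (stack, true, idx, check)
    else (stack, false, idx - 1, check)

def solution (n : Int) (w : Int) (num : Int) : Int :=
  let stack : List (List Int) := (PySem.List.pyRange 0 w 1).map (fun _ => ([] : List Int))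
  let st := (PySem.List.pyRange 1 (n + 1) 1).foldl (stepA w num) (stack, true, 0, 0)
  popWhileRev num ((st.1.getD st.2.2.2.toNat []).reverse) 0

-- ===== PORT B =====

-- number of t in [num-1, n-1] with t % p == res  (Source B's cnt)
def cntB (n : Int) (num : Int) (p : Int) (res : Int) : Int :=
  PySem.Int.floordiv (n - 1 - res) p - PySem.Int.floordiv (num - 2 - res) p

def solution_alt (n : Int) (w : Int) (num : Int) : Int :=
  -- Source B raises IndexError on the guard (no such box / no columns); outside Pre_,
  -- the port returns 0 there
  if w ≤ 0 ∨ num < 1 ∨ n < num then 0 else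
  let p := 2 * w
  let r := PySem.Int.mod (num - 1) p
  let c := if r < w then r else p - 1 - r
  cntB n num p c + cntB n num p (p - 1 - c)

-- ===== PRECONDITION & SPEC =====
-- Pre_: w ≥ 1 (else A's stack[idx] raises IndexError, B divides by 0) and
-- 1 ≤ num ≤ n (else A's while-pop exhausts the column and raises IndexError).
def Pre_solution (n : Int) (w : Int) (num : Int) : Prop := 1 ≤ w ∧ 1 ≤ num ∧ num ≤ n
instance (n : Int) (w : Int) (num : Int) : Decidable (Pre_solution n w num) := by
  unfold Pre_solution; infer_instance
def pvWitness_solution : Int × Int × Int := (5, 2, 3)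

def Spec_solution (n : Int) (w : Int) (num : Int) (out : Int) : Prop := out = solution_alt n w num
instance (n : Int) (w : Int) (num : Int) (out : Int) : Decidable (Spec_solution n w num out) := by
  unfold Spec_solution; infer_instance

-- ===== CLAIM (what is proved, stated in full; the proofs are below) =====
def Claim_equal_solution : Prop := ∀ (n : Int) (w : Int) (num : Int),
  Dom_solution n w num → Pre_solution n w num → Spec_solution n w num (solution n w num)

-- ===== LEMMAS AND PROOFS =====

-- the column (0-based) in which box k (1-based) lands, for width w
def colW (w : Int) (k : Int) : Int :=
  if (k - 1) % (2 * w) < w then (k - 1) % (2 * w) else 2 * w - 1 - ((k - 1) % (2 * w))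

-- the loop state A reaches after pushing boxes 1..i
def specStack (w : Int) (i : Int) : List (List Int) :=
  (PySem.List.pyRange 0 w 1).map
    (fun j => (PySem.List.pyRange 1 (i + 1) 1).filter (fun k => decide (colW w k = j)))

def specState (w : Int) (num : Int) (i : Int) : List (List Int) × Bool × Int × Int :=
  (specStack w i, decide (i % (2 * w) < w), colW w (i + 1),
    if 1 ≤ num ∧ num ≤ i then colW w num else 0)

theorem emod_succ (n p : Int) (hp : 0 < p) :
    (n + 1) % p = if n % p = p - 1 then 0 else n % p + 1 := by
  have h2 : 0 ≤ n % p := Int.emod_nonneg _ (by omega)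
  have h3 : n % p < p := Int.emod_lt_of_pos _ hp
  have hd := Int.mul_ediv_add_emod n p
  by_cases h : n % p = p - 1
  · have he : n + 1 = (n / p + 1) * p := by
      have hr : (n / p + 1) * p = p * (n / p) + p := by ring
      omega
    rw [he, if_pos h, Int.mul_emod_left]
  · have he : n + 1 = (n % p + 1) + p * (n / p) := by omega
    rw [he, if_neg h, Int.add_mul_emod_self_left,
      Int.emod_eq_of_lt (by omega) (by omega)]

theorem colW_bounds (w k : Int) (hw : 1 ≤ w) : 0 ≤ colW w k ∧ colW w k < w := by
  unfold colW
  have h2 : 0 ≤ (k - 1) % (2 * w) := Int.emod_nonneg _ (by omega)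
  have h3 : (k - 1) % (2 * w) < 2 * w := Int.emod_lt_of_pos _ (by omega)
  split <;> omega

theorem specStack_length (w i : Int) : (specStack w i).length = w.toNat := by
  simp [specStack, PySem.List.length_pyRange_one]

theorem specStack_getElem (w i : Int) (j : Nat) (hj : j < w.toNat) :
    (specStack w i)[j]'(by rw [specStack_length]; exact hj) =
      (PySem.List.pyRange 1 (i + 1) 1).filter (fun k => decide (colW w k = (j : Int))) := by
  simp [specStack, PySem.List.getElem_pyRange_one]

theorem specStack_succ (w m : Int) (hw : 1 ≤ w) (hm : 0 ≤ m) :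
    (specStack w m).set (colW w (m + 1)).toNat
      ((specStack w m).getD (colW w (m + 1)).toNat [] ++ [m + 1]) = specStack w (m + 1) := by
  have hc := colW_bounds w (m + 1) hw
  have hcl : (colW w (m + 1)).toNat < (specStack w m).length := by
    rw [specStack_length]; omega
  apply List.ext_getElem
  · rw [List.length_set, specStack_length, specStack_length]
  · intro j h1 h2
    have hj : j < w.toNat := by rw [specStack_length] at h2; exact h2
    rw [List.getElem_set, specStack_getElem w (m + 1) j hj,
      show m + 1 + 1 = (m + 1) + 1 from rfl,
      PySem.List.pyRange_one_succ_right (by omega), List.filter_append]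
    by_cases hij : (colW w (m + 1)).toNat = j
    · rw [if_pos hij, List.getD_eq_getElem _ _ hcl]
      have hcj : colW w (m + 1) = (j : Int) := by omega
      have : (colW w (m + 1)).toNat = j := hij
      rw [specStack_getElem w m (colW w (m + 1)).toNat (by omega)]
      rw [Int.toNat_of_nonneg hc.1, hcj]
      simp [hcj]
    · rw [if_neg hij, specStack_getElem w m j hj]
      have hcj : ¬ (colW w (m + 1) = (j : Int)) := by omega
      simp [hcj]

theorem loopInv (w num : Int) (hw : 1 ≤ w) :
    ∀ n : Int, 0 ≤ n →
      (PySem.List.pyRange 1 (n + 1) 1).foldl (stepA w num)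
          ((PySem.List.pyRange 0 w 1).map (fun _ => ([] : List Int)), true, 0, 0)
        = specState w num n := by
  intro n hn
  induction n, hn using Int.le_induction with
  | base =>
      rw [show PySem.List.pyRange 1 (0 + 1) 1 = [] from
        PySem.List.pyRange_one_eq_nil (by omega), List.foldl_nil]
      simp only [specState]
      have c1 : (PySem.List.pyRange 0 w 1).map (fun _ => ([] : List Int)) = specStack w 0 := by
        unfold specStack
        apply List.map_congr_left
        intro j _
        rw [show (0:Int) + 1 = 1 by ring, PySem.List.pyRange_one_eq_nil (le_refl 1)]
        rfl
      have c2 : decide ((0:Int) % (2 * w) < w) = true := by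
        rw [Int.zero_emod]; simp only [decide_eq_true_eq]; omega
      have c3 : colW w (0 + 1) = 0 := by
        unfold colW
        rw [show (0:Int) + 1 - 1 = 0 by ring, Int.zero_emod, if_pos (by omega)]
      have c4 : (if 1 ≤ num ∧ num ≤ (0:Int) then colW w num else 0) = 0 := by
        rw [if_neg (by omega)]
      rw [c1, c2, c3, c4]
  | succ m hm ih =>
      rw [show m + 1 + 1 = (m + 1) + 1 from rfl,
        PySem.List.pyRange_one_succ_right (by omega), List.foldl_append, ih,
        List.foldl_cons, List.foldl_nil]
      have hr0 : 0 ≤ m % (2 * w) := Int.emod_nonneg _ (by omega)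
      have hr1 : m % (2 * w) < 2 * w := Int.emod_lt_of_pos _ (by omega)
      have hsucc := emod_succ m (2 * w) (by omega)
      have hsucc2 := emod_succ (m + 1) (2 * w) (by omega)
      have hcol1 : colW w (m + 1) = if m % (2 * w) < w then m % (2 * w)
          else 2 * w - 1 - m % (2 * w) := by
        unfold colW; rw [show m + 1 - 1 = m by ring]
      have hcol2 : colW w (m + 1 + 1) = if (m + 1) % (2 * w) < w then (m + 1) % (2 * w)
          else 2 * w - 1 - (m + 1) % (2 * w) := by
        unfold colW; rw [show m + 1 + 1 - 1 = m + 1 by ring]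
      have hstack : (specStack w m).set (colW w (m + 1)).toNat
          ((specStack w m).getD (colW w (m + 1)).toNat [] ++ [m + 1]) = specStack w (m + 1) :=
        specStack_succ w m hw hm
      have hcheck : (if m + 1 = num then colW w (m + 1)
            else if 1 ≤ num ∧ num ≤ m then colW w num else 0)
          = (if 1 ≤ num ∧ num ≤ m + 1 then colW w num else 0) := by
        by_cases hnum : m + 1 = num
        · rw [if_pos hnum, if_pos (by omega), hnum]
        · rw [if_neg hnum]
          split_ifs <;> first | rfl | omega
      simp only [stepA, specState]
      rw [hstack, hcheck]
      by_cases hrw : m % (2 * w) < w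
      · simp only [decide_eq_true_eq, if_pos hrw]
        by_cases hend : colW w (m + 1) = w - 1
        · rw [if_pos hend]
          rw [hcol1, if_pos hrw] at hend
          simp only [Prod.mk.injEq]
          refine ⟨trivial, ?_, ?_, trivial⟩
          · symm; rw [decide_eq_false_iff_not, hsucc]; split_ifs <;> omega
          · rw [hcol1, hcol2, hsucc]; split_ifs <;> omega
        · rw [if_neg hend]
          rw [hcol1, if_pos hrw] at hend
          simp only [Prod.mk.injEq]
          refine ⟨trivial, ?_, ?_, trivial⟩
          · symm; rw [decide_eq_true_eq, hsucc]; split_ifs <;> omega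
          · rw [hcol1, hcol2, hsucc]; split_ifs <;> omega
      · simp only [decide_eq_true_eq, if_neg hrw]
        by_cases hend : colW w (m + 1) = 0
        · rw [if_pos hend]
          rw [hcol1, if_neg hrw] at hend
          simp only [Prod.mk.injEq]
          refine ⟨trivial, ?_, ?_, trivial⟩
          · symm; rw [decide_eq_true_eq, hsucc]; split_ifs <;> omega
          · rw [hcol1, hcol2, hsucc]; split_ifs <;> omega
        · rw [if_neg hend]
          rw [hcol1, if_neg hrw] at hend
          simp only [Prod.mk.injEq]
          refine ⟨trivial, ?_, ?_, trivial⟩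
          · symm; rw [decide_eq_false_iff_not, hsucc]; split_ifs <;> omega
          · rw [hcol1, hcol2, hsucc]; split_ifs <;> omega

theorem popWhileRev_spec (num : Int) (t : List Int) :
    ∀ (m : List Int) (a : Int), num ∉ m →
      popWhileRev num (m ++ num :: t) a = a + m.length + 1 := by
  intro m
  induction m with
  | nil => intro a _; simp [popWhileRev]
  | cons x xs ih =>
      intro a hnm
      have hx : num ≠ x := by simp at hnm; tauto
      simp only [List.cons_append, popWhileRev, if_neg hx]
      rw [ih _ (by simp at hnm; tauto)]
      simp; omega

theorem solution_eq_countP (n w num : Int) (hw : 1 ≤ w) (h1 : 1 ≤ num) (h2 : num ≤ n) :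
    solution n w num =
      ((PySem.List.pyRange num (n + 1) 1).countP (fun k => decide (colW w k = colW w num)) : Int) := by
  simp only [solution]
  rw [loopInv w num hw n (by omega)]
  simp only [specState]
  rw [if_pos ⟨h1, h2⟩]
  have hc := colW_bounds w num hw
  have hcl : (colW w num).toNat < (specStack w n).length := by
    rw [specStack_length]; omega
  rw [List.getD_eq_getElem _ _ hcl,
    specStack_getElem w n (colW w num).toNat (by rw [specStack_length] at hcl; exact hcl),
    Int.toNat_of_nonneg hc.1,
    PySem.List.pyRange_one_append 1 num (n + 1) (by omega) (by omega),
    PySem.List.pyRange_one_cons (by omega : num < n + 1),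
    List.filter_append, List.filter_cons_of_pos (by simp),
    List.reverse_append, List.reverse_cons, List.append_assoc, List.singleton_append]
  have hnm : num ∉ (((PySem.List.pyRange (num + 1) (n + 1) 1).filter
      (fun k => decide (colW w k = colW w num))).reverse) := by
    simp only [List.mem_reverse, List.mem_filter, PySem.List.mem_pyRange_one]
    rintro ⟨⟨hk1, hk2⟩, -⟩
    omega
  rw [popWhileRev_spec num _ _ 0 hnm, List.countP_cons, List.length_reverse]
  have hlf := List.countP_eq_length_filter
    (l := PySem.List.pyRange (num + 1) (n + 1) 1)
    (p := fun k => decide (colW w k = colW w num))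
  simp only [decide_eq_true_eq, if_true]
  omega

theorem fdiv_step (x p : Int) (hp : 0 < p) :
    PySem.Int.floordiv x p - PySem.Int.floordiv (x - 1) p = if x % p = 0 then 1 else 0 := by
  rw [PySem.Int.floordiv_eq_ediv_of_pos hp, PySem.Int.floordiv_eq_ediv_of_pos hp]
  have hd := Int.mul_ediv_add_emod x p
  have h2 : 0 ≤ x % p := Int.emod_nonneg _ (by omega)
  have h3 : x % p < p := Int.emod_lt_of_pos _ hp
  by_cases h : x % p = 0
  · have he : x - 1 = (p - 1) + p * (x / p - 1) := by
      have hr : p * (x / p - 1) = p * (x / p) - p := by ring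
      omega
    have hz : (p - 1) / p = 0 := Int.ediv_eq_zero_of_lt (by omega) (by omega)
    rw [if_pos h, he, Int.add_mul_ediv_left _ _ (by omega : p ≠ 0), hz]
    omega
  · have he : x - 1 = (x % p - 1) + p * (x / p) := by omega
    have hz : (x % p - 1) / p = 0 := Int.ediv_eq_zero_of_lt (by omega) (by omega)
    rw [if_neg h, he, Int.add_mul_ediv_left _ _ (by omega : p ≠ 0), hz]
    omega

theorem emod_sub_res (m p res : Int) (h0 : 0 ≤ res) (h1 : res < p) :
    (m - res) % p = 0 ↔ m % p = res := by
  rw [← Int.emod_eq_emod_iff_emod_sub_eq_zero, Int.emod_eq_of_lt h0 h1]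

theorem cntB_eq_countP (p res : Int) (hp : 0 < p) (hres : 0 ≤ res) (hres2 : res < p)
    (a : Int) : ∀ n : Int, a - 1 ≤ n →
    cntB n a p res = ((PySem.List.pyRange a (n + 1) 1).countP
      (fun k => decide ((k - 1) % p = res)) : Int) := by
  intro n hn
  induction n, hn using Int.le_induction with
  | base =>
      rw [show PySem.List.pyRange a (a - 1 + 1) 1 = [] from
        PySem.List.pyRange_one_eq_nil (by omega)]
      unfold cntB
      rw [show a - 1 - 1 - res = a - 2 - res by ring]
      simp
  | succ m hm ih =>
      rw [show m + 1 + 1 = (m + 1) + 1 from rfl,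
        PySem.List.pyRange_one_succ_right (by omega), List.countP_append]
      push_cast
      rw [← ih]
      have hsingle : ((List.countP (fun k => decide ((k - 1) % p = res)) [m + 1] : Nat) : Int)
          = if m % p = res then 1 else 0 := by
        simp only [List.countP_cons, List.countP_nil]
        rw [show m + 1 - 1 = m by ring]
        by_cases h : m % p = res <;> simp [h]
      rw [hsingle]
      unfold cntB
      rw [show m + 1 - 1 - res = m - res by ring]
      have hstep : PySem.Int.floordiv (m - res) p - PySem.Int.floordiv (m - res - 1) p
          = if m % p = res then 1 else 0 := by
        rw [fdiv_step (m - res) p hp]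
        by_cases h : m % p = res
        · rw [if_pos ((emod_sub_res m p res hres hres2).mpr h), if_pos h]
        · rw [if_neg (fun hc => h ((emod_sub_res m p res hres hres2).mp hc)), if_neg h]
      rw [show m - 1 - res = m - res - 1 by ring] at *
      split_ifs at hstep ⊢ <;> omega

theorem countP_add (l : List Int) (p1 p2 q : Int → Bool)
    (h : ∀ k, ((if p1 k then 1 else 0) + (if p2 k then 1 else 0) : Nat)
      = if q k then 1 else 0) :
    l.countP p1 + l.countP p2 = l.countP q := by
  induction l with
  | nil => rfl
  | cons x xs ih =>
      simp only [List.countP_cons]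
      have := h x
      omega

theorem alt_eq_countP (n w num : Int) (hw : 1 ≤ w) (_h1 : 1 ≤ num) (h2 : num ≤ n) :
    solution_alt n w num =
      ((PySem.List.pyRange num (n + 1) 1).countP (fun k => decide (colW w k = colW w num)) : Int) := by
  have hp : (0:Int) < 2 * w := by omega
  have hc := colW_bounds w num hw
  simp only [solution_alt]
  rw [if_neg (by omega : ¬(w ≤ 0 ∨ num < 1 ∨ n < num)), PySem.Int.mod_eq_emod_of_pos hp]
  have hcc : (if (num - 1) % (2 * w) < w then (num - 1) % (2 * w)
      else 2 * w - 1 - (num - 1) % (2 * w)) = colW w num := by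
    unfold colW; rfl
  rw [hcc,
    cntB_eq_countP (2 * w) (colW w num) hp hc.1 (by omega) num n (by omega),
    cntB_eq_countP (2 * w) (2 * w - 1 - colW w num) hp (by omega) (by omega) num n (by omega)]
  have hpoint : ∀ k : Int,
      ((if (fun k => decide ((k - 1) % (2 * w) = colW w num)) k then 1 else 0)
        + (if (fun k => decide ((k - 1) % (2 * w) = 2 * w - 1 - colW w num)) k then 1 else 0) : Nat)
      = if (fun k => decide (colW w k = colW w num)) k then 1 else 0 := by
    intro k
    have h0 : 0 ≤ (k - 1) % (2 * w) := Int.emod_nonneg _ (by omega)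
    have h1' : (k - 1) % (2 * w) < 2 * w := Int.emod_lt_of_pos _ (by omega)
    simp only [decide_eq_true_eq]
    unfold colW
    split_ifs <;> omega
  have hsum := countP_add (PySem.List.pyRange num (n + 1) 1)
    (fun k => decide ((k - 1) % (2 * w) = colW w num))
    (fun k => decide ((k - 1) % (2 * w) = 2 * w - 1 - colW w num))
    (fun k => decide (colW w k = colW w num)) hpoint
  omega

-- ===== VERDICT (by name: the statement is the Claim_ definition above) =====
theorem solution_spec : Claim_equal_solution := by
  intro n w num _ hpre
  obtain ⟨hw, h1, h2⟩ := hpre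
  unfold Spec_solution
  rw [solution_eq_countP n w num hw h1 h2, alt_eq_countP n w num hw h1 h2]
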